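-- pv_equiv track=rewrite | github.com/letiziaia/SmartWater | data_wrangling/pretransform.py | next_available_key
-- ===== SOURCE A (Python) =====
-- def next_available_key(base, currently_in_use):
--     currently_in_use = set(currently_in_use)
--     suggestion = base
--     suffix = 1
--     while suggestion in currently_in_use:
--         suggestion = base + suffix
--         suffix += 1
--     return suggestion
-- ===== SOURCE B (Python) =====
-- def next_available_key(base, currently_in_use):
--     candidate = base
--     for v in sorted(v for v in set(currently_in_use) if v >= base):
--         if v != candidate:
--             break
--         candidate += 1
--     return candidate
-- ===== Notes on version B (the rewrite author's own statement) =====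
-- stated objective: alternative
-- what changed: Instead of probing base, base+1, ... against the set one by one, B sorts the distinct used values >= base and finds the first gap in a single ordered scan with an early break.
import Mathlib
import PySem

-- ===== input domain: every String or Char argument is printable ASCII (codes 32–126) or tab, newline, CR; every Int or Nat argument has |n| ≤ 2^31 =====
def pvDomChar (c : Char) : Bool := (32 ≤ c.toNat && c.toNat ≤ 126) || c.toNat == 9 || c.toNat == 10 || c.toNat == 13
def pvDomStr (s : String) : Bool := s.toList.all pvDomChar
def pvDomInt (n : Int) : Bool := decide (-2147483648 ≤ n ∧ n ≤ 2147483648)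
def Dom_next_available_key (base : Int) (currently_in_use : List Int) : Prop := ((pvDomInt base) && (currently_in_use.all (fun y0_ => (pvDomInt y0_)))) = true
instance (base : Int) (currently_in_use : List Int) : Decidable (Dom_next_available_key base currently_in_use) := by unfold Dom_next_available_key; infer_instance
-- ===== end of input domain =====

-- B replaces A's one-by-one membership probing (base, base+1, ...) by a single
-- ordered scan of the sorted distinct used values ≥ base (objective: alternative).

-- ===== PORT A =====
-- A's while-loop: probe suggestion = base, then base+suffix with suffix = 1,2,...
-- fuel = |set|+1 suffices (pigeonhole: among |set|+1 distinct probes one is free);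
-- proved below, so the fuel-0 branch is never reached.
def pvAProbe (s : List Int) (base : Int) : Nat → Int → Int → Int
  | 0, suggestion, _ => suggestion
  | fuel + 1, suggestion, suffix =>
    if suggestion ∈ s then pvAProbe s base fuel (base + suffix) (suffix + 1)
    else suggestion

def next_available_key (base : Int) (currently_in_use : List Int) : Int :=
  let s := PySem.Set.ofList currently_in_use
  pvAProbe s base (s.length + 1) base 1

-- ===== PORT B =====
-- scan the sorted distinct used values ≥ base; break at the first gap
def pvBScan : Int → List Int → Int
  | c, [] => c
  | c, v :: rest => if v ≠ c then c else pvBScan (c + 1) rest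

def next_available_key_alt (base : Int) (currently_in_use : List Int) : Int :=
  pvBScan base
    (PySem.List.sorted ((PySem.Set.ofList currently_in_use).filter (fun v => base ≤ v))
      (fun x => x) false)

-- ===== PRECONDITION & SPEC =====
def Spec_next_available_key (base : Int) (currently_in_use : List Int) (out : Int) : Prop := out = next_available_key_alt base currently_in_use
instance (base : Int) (currently_in_use : List Int) (out : Int) : Decidable (Spec_next_available_key base currently_in_use out) := by unfold Spec_next_available_key; infer_instance

-- ===== CLAIM (what is proved, stated in full; the proofs are below) =====
def Claim_equal_next_available_key : Prop := ∀ (base : Int) (currently_in_use : List Int), Dom_next_available_key base currently_in_use → Spec_next_available_key base currently_in_use (next_available_key base currently_in_use)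

-- ===== LEMMAS AND PROOFS =====

/-- `r` is the least value ≥ `base` not occurring in `s`. -/
def pvGood (s : List Int) (base r : Int) : Prop :=
  base ≤ r ∧ r ∉ s ∧ ∀ x, base ≤ x → x < r → x ∈ s

theorem pvGood_unique {s : List Int} {base r₁ r₂ : Int}
    (h₁ : pvGood s base r₁) (h₂ : pvGood s base r₂) : r₁ = r₂ := by
  obtain ⟨hb₁, hn₁, hl₁⟩ := h₁
  obtain ⟨hb₂, hn₂, hl₂⟩ := h₂
  rcases lt_trichotomy r₁ r₂ with h | h | h
  · exact absurd (hl₂ r₁ hb₁ h) hn₁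
  · exact h
  · exact absurd (hl₁ r₂ hb₂ h) hn₂

theorem pvNodup_exists_free (s : List Int) (base : Int) :
    ∃ k : Nat, k ≤ s.length ∧ base + (k : Int) ∉ s := by
  by_contra h
  push_neg at h
  have hsub : ((List.range (s.length + 1)).map (fun k : Nat => base + (k : Int))) ⊆ s := by
    intro x hx
    simp only [List.mem_map, List.mem_range] at hx
    obtain ⟨k, hk, rfl⟩ := hx
    exact h k (Nat.lt_succ_iff.mp hk)
  have hndl : ((List.range (s.length + 1)).map (fun k : Nat => base + (k : Int))).Nodup := by
    refine List.Nodup.map ?_ (List.nodup_range)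
    intro a b hab
    have h' : (a : Int) = b := by simpa using hab
    exact_mod_cast h'
  have hlen : ((List.range (s.length + 1)).map (fun k : Nat => base + (k : Int))).length ≤ s.length := by
    calc ((List.range (s.length + 1)).map (fun k : Nat => base + (k : Int))).length
        = ((List.range (s.length + 1)).map (fun k : Nat => base + (k : Int))).toFinset.card :=
          (List.toFinset_card_of_nodup hndl).symm
      _ ≤ s.toFinset.card := Finset.card_le_card (by
          intro x hx
          simp only [List.mem_toFinset] at *
          exact hsub hx)
      _ ≤ s.length := s.toFinset_card_le
  simp at hlen

theorem pvAProbe_good (s : List Int) (base : Int) :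
    ∀ (fuel j : Nat), (∃ k : Nat, k < fuel ∧ base + ((j : Int) + k) ∉ s) →
    (∀ x, base ≤ x → x < base + (j : Int) → x ∈ s) →
    pvGood s base (pvAProbe s base fuel (base + (j : Int)) ((j : Int) + 1)) := by
  intro fuel
  induction fuel with
  | zero => intro j hex _; obtain ⟨k, hk, _⟩ := hex; omega
  | succ fuel ih =>
    intro j hex hist
    by_cases hmem : base + (j : Int) ∈ s
    · have step : pvAProbe s base (fuel + 1) (base + (j : Int)) ((j : Int) + 1)
          = pvAProbe s base fuel (base + ((j : Int) + 1)) (((j : Int) + 1) + 1) := by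
        simp [pvAProbe, hmem]
      rw [step]
      have hcast : base + ((j : Int) + 1) = base + ((j + 1 : Nat) : Int) := by push_cast; ring
      have hcast2 : ((j : Int) + 1) + 1 = ((j + 1 : Nat) : Int) + 1 := by push_cast; ring
      rw [hcast, hcast2]
      apply ih
      · obtain ⟨k, hk, hfree⟩ := hex
        have hk0 : k ≠ 0 := by
          intro h0; subst h0; simp at hfree; exact hfree hmem
        refine ⟨k - 1, by omega, ?_⟩
        have : base + (((j + 1 : Nat) : Int) + ((k - 1 : Nat) : Int)) = base + ((j : Int) + k) := by
          push_cast; omega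
        rw [this]; exact hfree
      · intro x hx hlt
        by_cases hxe : x = base + (j : Int)
        · subst hxe; exact hmem
        · exact hist x hx (by push_cast at hlt ⊢; omega)
    · have step : pvAProbe s base (fuel + 1) (base + (j : Int)) ((j : Int) + 1)
          = base + (j : Int) := by simp [pvAProbe, hmem]
      rw [step]
      exact ⟨by omega, hmem, hist⟩

theorem pvA_good (base : Int) (currently_in_use : List Int) :
    pvGood (PySem.Set.ofList currently_in_use) base
      (next_available_key base currently_in_use) := by
  obtain ⟨k, hk, hfree⟩ := pvNodup_exists_free (PySem.Set.ofList currently_in_use) base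
  have h0 : next_available_key base currently_in_use
      = pvAProbe (PySem.Set.ofList currently_in_use) base
          ((PySem.Set.ofList currently_in_use).length + 1) (base + ((0 : Nat) : Int)) (((0 : Nat) : Int) + 1) := by
    simp [next_available_key]
  rw [h0]
  apply pvAProbe_good
  · exact ⟨k, by omega, by simpa using hfree⟩
  · intro x hx hlt
    exfalso
    simp only [Nat.cast_zero, add_zero] at hlt
    omega

theorem pvBScan_good :
    ∀ (u : List Int), u.Pairwise (· < ·) → ∀ c : Int, (∀ x ∈ u, c ≤ x) →
    pvGood u c (pvBScan c u) := by
  intro u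
  induction u with
  | nil =>
    intro _ c _
    simp only [pvBScan]
    exact ⟨le_refl c, by simp, fun x hx hlt => by omega⟩
  | cons v rest ih =>
    intro hpw c hge
    have hv : ∀ y ∈ rest, v < y := (List.pairwise_cons.mp hpw).1
    have hrest : rest.Pairwise (· < ·) := (List.pairwise_cons.mp hpw).2
    have hcv : c ≤ v := hge v (List.mem_cons_self ..)
    by_cases hne : v ≠ c
    · have step : pvBScan c (v :: rest) = c := by simp [pvBScan, hne]
      rw [step]
      refine ⟨le_refl c, ?_, fun x hx hlt => by omega⟩
      intro hc
      rcases List.mem_cons.mp hc with h | h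
      · exact hne h.symm
      · have := hv c h; omega
    · push_neg at hne
      subst hne
      have step : pvBScan v (v :: rest) = pvBScan (v + 1) rest := by simp [pvBScan]
      rw [step]
      obtain ⟨hb, hn, hl⟩ := ih hrest (v + 1) (fun x hx => by have := hv x hx; omega)
      refine ⟨by omega, ?_, ?_⟩
      · intro hc
        rcases List.mem_cons.mp hc with h | h
        · omega
        · exact hn h
      · intro x hx hlt
        by_cases hxv : x = v
        · subst hxv; exact List.mem_cons_self ..
        · exact List.mem_cons_of_mem _ (hl x (by omega) hlt)

theorem pvB_good (base : Int) (currently_in_use : List Int) :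
    pvGood (PySem.Set.ofList currently_in_use) base
      (next_available_key_alt base currently_in_use) := by
  set s := PySem.Set.ofList currently_in_use with hs
  set u := PySem.List.sorted (s.filter (fun v => base ≤ v)) (fun x => x) false with hu
  have hmemu : ∀ x, x ∈ u ↔ (x ∈ s ∧ base ≤ x) := by
    intro x
    rw [hu, PySem.List.mem_sorted, List.mem_filter]
    simp
  have hndu : u.Nodup := by
    have : u.Perm (s.filter (fun v => base ≤ v)) := PySem.List.sorted_perm ..
    exact this.nodup_iff.mpr ((PySem.Set.nodup_ofList _).filter _)
  have hle : u.Pairwise (fun a b => a ≤ b) := by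
    have := PySem.List.sorted_pairwise (xs := s.filter (fun v => base ≤ v)) (key := fun x => x)
    simpa [hu] using this
  have hpw : u.Pairwise (· < ·) := by
    have hne : u.Pairwise (· ≠ ·) := hndu
    have := List.Pairwise.and hle hne
    exact this.imp (fun h => lt_of_le_of_ne h.1 h.2)
  have hge : ∀ x ∈ u, base ≤ x := fun x hx => ((hmemu x).mp hx).2
  obtain ⟨hb, hn, hl⟩ := pvBScan_good u hpw base hge
  have halt : next_available_key_alt base currently_in_use = pvBScan base u := by
    simp [next_available_key_alt, hu, hs]
  rw [halt]
  refine ⟨hb, ?_, ?_⟩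
  · intro hc
    exact hn ((hmemu _).mpr ⟨hc, hb⟩)
  · intro x hx hlt
    exact ((hmemu x).mp (hl x hx hlt)).1

-- ===== VERDICT (by name: the statement is the Claim_ definition above) =====
theorem next_available_key_spec : Claim_equal_next_available_key := by
  intro base currently_in_use _
  unfold Spec_next_available_key
  exact pvGood_unique (pvA_good base currently_in_use) (pvB_good base currently_in_use)
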